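-- pv_equiv track=rewrite | github.com/funny1dog/cses-tira21k | bothsame.py | count
-- ===== SOURCE A (Python) =====
-- def count(s):
--     dic = dict()
--     for i in range(len(s)):
--         if s[i] in dic:
--             dic[s[i]] += 1
--         else:
--             dic[s[i]] = 1
--     res = 0
--     for i in dic.values():
--         res += (i + 1) * i // 2
--     return res
-- ===== SOURCE B (Python) =====
-- def count(s):
--     t = sorted(s)
--     total = 0
--     i = 0
--     n = len(t)
--     while i < n:
--         j = i + 1
--         while j < n and t[j] == t[i]:
--             j += 1
--         c = j - i
--         total += c * (c + 1) // 2
--         i = j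
--     return total
-- ===== Notes on version B (the rewrite author's own statement) =====
-- stated objective: alternative
-- what changed: Replaced A's hash-table frequency count (dict build plus a second pass over the values) by sorting the string and walking it once, accumulating c*(c+1)//2 for each run of equal characters.
import Mathlib
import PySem

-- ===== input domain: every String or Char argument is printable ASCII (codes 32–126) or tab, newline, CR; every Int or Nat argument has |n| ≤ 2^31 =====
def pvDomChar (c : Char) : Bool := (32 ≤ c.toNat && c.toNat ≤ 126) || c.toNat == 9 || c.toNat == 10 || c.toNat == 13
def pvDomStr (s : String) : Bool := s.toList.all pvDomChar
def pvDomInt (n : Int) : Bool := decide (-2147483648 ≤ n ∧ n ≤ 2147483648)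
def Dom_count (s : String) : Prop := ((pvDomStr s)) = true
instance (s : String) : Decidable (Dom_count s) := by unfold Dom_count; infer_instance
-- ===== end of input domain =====

-- B replaces A's hash-table frequency count (dict build + pass over values) by a
-- sort-then-group-runs traversal of the string; objective: alternative algorithm.

-- ===== PORT A =====
-- for i in range(len(s)): if s[i] in dic: dic[s[i]] += 1 else: dic[s[i]] = 1
-- then: for i in dic.values(): res += (i + 1) * i // 2
def count (s : String) : Int :=
  ((PySem.List.pyRange 0 (s.toList.length : Int)).foldl
    (fun d i =>
      if d.contains (PySem.List.pyGetD s.toList i ' ')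
      then d.insert (PySem.List.pyGetD s.toList i ' ')
             (d.getD (PySem.List.pyGetD s.toList i ' ') 0 + 1)
      else d.insert (PySem.List.pyGetD s.toList i ' ') (1 : Int))
    PySem.Dict.empty).values.foldl
    (fun res i => res + PySem.Int.floordiv ((i + 1) * i) 2) 0

-- ===== PORT B =====
-- the outer while-loop of Source B: each step consumes one run t[i..j) of equal
-- characters (the inner while = takeWhile) and adds c*(c+1)//2 for its length c
def countAltGo : List Char → Int
  | [] => 0
  | c :: rest =>
    let run := rest.takeWhile (fun x => x == c)
    let k : Int := (run.length : Int) + 1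
    PySem.Int.floordiv (k * (k + 1)) 2 + countAltGo (rest.dropWhile (fun x => x == c))
termination_by l => l.length
decreasing_by
  simpa using Nat.lt_succ_of_le (List.length_dropWhile_le _ rest)

def count_alt (s : String) : Int :=
  countAltGo (PySem.List.sorted s.toList (fun x => x) false)

-- ===== PRECONDITION & SPEC =====
def Spec_count (s : String) (out : Int) : Prop := out = count_alt s
instance (s : String) (out : Int) : Decidable (Spec_count s out) := by unfold Spec_count; infer_instance

-- ===== CLAIM (what is proved, stated in full; the proofs are below) =====
def Claim_equal_count : Prop := ∀ (s : String), Dom_count s → Spec_count s (count s)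

-- ===== LEMMAS AND PROOFS =====

-- the triangular-number summand both programs use
def pvT (i : Int) : Int := PySem.Int.floordiv ((i + 1) * i) 2

-- A's dict-building loop is Counter(s)
theorem pv_fold_eq_counter (l : List Char) :
    l.foldl
      (fun d c => if d.contains c then d.insert c (d.getD c 0 + 1) else d.insert c (1 : Int))
      PySem.Dict.empty = PySem.Dict.counter l := by
  rw [PySem.List.foldl_congr_mem l _
      (fun d c => d.insert c (d.getD c 0 + 1)) PySem.Dict.empty]
  · exact PySem.Dict.foldl_insert_getD_add_one_eq_counter l
  · intro d c _
    by_cases h : d.contains c = true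
    · simp [h]
    · have hnone : d.get? c = none := by
        have := PySem.Dict.contains_eq_isSome_get? d c
        rw [this] at h
        exact Option.not_isSome_iff_eq_none.mp (by simpa using h)
      simp [h, PySem.Dict.getD, hnone]

-- A's value as a sum over the distinct characters
theorem pv_count_eq_sum (s : String) :
    count s = ((PySem.Set.ofList s.toList).map
      (fun k => pvT ((s.toList.count k : Nat) : Int))).sum := by
  unfold count
  have h1 : (PySem.List.pyRange 0 (s.toList.length : Int)).foldl
      (fun d i =>
        if d.contains (PySem.List.pyGetD s.toList i ' ')
        then d.insert (PySem.List.pyGetD s.toList i ' ')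
               (d.getD (PySem.List.pyGetD s.toList i ' ') 0 + 1)
        else d.insert (PySem.List.pyGetD s.toList i ' ') (1 : Int))
      PySem.Dict.empty =
      s.toList.foldl
        (fun d c => if d.contains c then d.insert c (d.getD c 0 + 1) else d.insert c (1 : Int))
        PySem.Dict.empty :=
    PySem.List.foldl_pyRange_zero_pyGetD' s.toList ' '
      (fun d c => if d.contains c then d.insert c (d.getD c 0 + 1) else d.insert c (1 : Int))
      PySem.Dict.empty
  rw [h1, pv_fold_eq_counter]
  rw [PySem.List.foldl_add]
  have hv : (PySem.Dict.counter s.toList).values =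
      (PySem.Set.ofList s.toList).map (fun k => ((s.toList.count k : Nat) : Int)) := by
    show (PySem.Dict.counter s.toList).items.map (·.2) = _
    rw [PySem.Dict.items_counter]
    simp [List.map_map, Function.comp]
  rw [hv, List.map_map]
  simp [pvT, Function.comp_def]

-- folding Set.add over a list not containing c commutes with a leading c
theorem pv_add_cons (dw : List Char) (c : Char) (hc : c ∉ dw) :
    ∀ (t : List Char), dw.foldl PySem.Set.add (c :: t) = c :: dw.foldl PySem.Set.add t := by
  induction dw with
  | nil => intro t; rfl
  | cons x xs ih =>
    intro t
    have hxc : x ≠ c := by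
      intro h; exact hc (by simp [h])
    have hstep : PySem.Set.add (c :: t) x = c :: PySem.Set.add t x := by
      by_cases h : x ∈ t
      · simp [PySem.Set.add, PySem.Set.contains, hxc, h]
      · simp [PySem.Set.add, PySem.Set.contains, hxc, h]
    simp only [List.foldl_cons, hstep]
    exact ih (fun h => hc (List.mem_cons_of_mem _ h)) _

-- a run of elements all equal to an already-present c adds nothing to the set
theorem pv_fold_run (tw : List Char) (c : Char) (htw : ∀ x ∈ tw, x = c) :
    tw.foldl PySem.Set.add [c] = [c] := by
  induction tw with
  | nil => rfl
  | cons x xs ih =>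
    have hx : x = c := htw x (by simp)
    have hstep : PySem.Set.add [c] x = [c] := by
      simp [PySem.Set.add, PySem.Set.contains, hx]
    simp only [List.foldl_cons, hstep]
    exact ih (fun y hy => htw y (by simp [hy]))

-- Set.ofList of "c, then a run of c's, then a tail without c"
theorem pv_ofList_run (c : Char) (tw dw : List Char)
    (htw : ∀ x ∈ tw, x = c) (hdw : c ∉ dw) :
    PySem.Set.ofList (c :: (tw ++ dw)) = c :: PySem.Set.ofList dw := by
  rw [PySem.Set.ofList_eq_foldl, PySem.Set.ofList_eq_foldl]
  have h1 : (c :: (tw ++ dw)).foldl PySem.Set.add [] =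
      (tw ++ dw).foldl PySem.Set.add [c] := by
    simp [PySem.Set.add, PySem.Set.contains]
  rw [h1, List.foldl_append, pv_fold_run tw c htw]
  exact pv_add_cons dw c hdw []

-- the characters takeWhile keeps are all equal to c
theorem pv_tw_all (c : Char) (rest : List Char) :
    ∀ x ∈ rest.takeWhile (fun x => x == c), x = c := by
  intro x hx
  simpa using List.mem_takeWhile_imp hx

-- on a sorted tail, the dropWhile part no longer contains c
theorem pv_not_mem_dropWhile (c : Char) (rest : List Char)
    (hple : ∀ x ∈ rest, c ≤ x) (hprest : rest.Pairwise (· ≤ ·)) :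
    c ∉ rest.dropWhile (fun x => x == c) := by
  intro hmem
  have hpdw : (rest.dropWhile (fun x => x == c)).Pairwise (· ≤ ·) :=
    hprest.sublist (List.dropWhile_sublist _)
  cases hdwe : rest.dropWhile (fun x => x == c) with
  | nil => rw [hdwe] at hmem; simp at hmem
  | cons h t =>
    rw [hdwe] at hmem hpdw
    have hhead : (h == c) = false := by
      have := List.head?_dropWhile_not (fun x => x == c) rest
      rw [hdwe] at this
      simpa using this
    have hhc : h ≠ c := by simpa using hhead
    have hch : c ≤ h := hple h ((List.dropWhile_sublist _).mem (by rw [hdwe]; simp))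
    rcases List.mem_cons.mp hmem with h1 | h2
    · exact hhc h1.symm
    · have hht : h ≤ c := (List.pairwise_cons.mp hpdw).1 c h2
      exact hhc (le_antisymm hht hch)

-- B's run-length traversal of a sorted list computes the same sum
theorem pv_go_eq_sum : ∀ (n : Nat) (l : List Char), l.length ≤ n →
    l.Pairwise (· ≤ ·) →
    countAltGo l = ((PySem.Set.ofList l).map
      (fun k => pvT ((l.count k : Nat) : Int))).sum := by
  intro n
  induction n with
  | zero =>
    intro l hl _
    have : l = [] := List.length_eq_zero_iff.mp (Nat.le_zero.mp hl)
    subst this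
    simp [countAltGo]
  | succ n ih =>
    intro l hl hp
    match l with
    | [] => simp [countAltGo]
    | c :: rest =>
      have hple : ∀ x ∈ rest, c ≤ x := (List.pairwise_cons.mp hp).1
      have hprest : rest.Pairwise (· ≤ ·) := (List.pairwise_cons.mp hp).2
      have htw : ∀ x ∈ rest.takeWhile (fun x => x == c), x = c := pv_tw_all c rest
      have hdw : c ∉ rest.dropWhile (fun x => x == c) :=
        pv_not_mem_dropWhile c rest hple hprest
      have hpdw : (rest.dropWhile (fun x => x == c)).Pairwise (· ≤ ·) :=
        hprest.sublist (List.dropWhile_sublist _)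
      have hsplit : rest.takeWhile (fun x => x == c) ++ rest.dropWhile (fun x => x == c) = rest :=
        List.takeWhile_append_dropWhile
      -- counts
      have hcount_c : (c :: rest).count c = 1 + (rest.takeWhile (fun x => x == c)).length := by
        conv_lhs => rw [← hsplit]
        rw [List.count_cons_self, List.count_append]
        have h1 : (rest.takeWhile (fun x => x == c)).count c =
            (rest.takeWhile (fun x => x == c)).length :=
          List.count_eq_length.mpr (fun b hb => (htw b hb).symm)
        have h2 : (rest.dropWhile (fun x => x == c)).count c = 0 :=
          List.count_eq_zero.mpr hdw
        omega
      have hcount_k : ∀ k ∈ rest.dropWhile (fun x => x == c),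
          (c :: rest).count k = (rest.dropWhile (fun x => x == c)).count k := by
        intro k hk
        have hkc : k ≠ c := fun h => hdw (h ▸ hk)
        have h1 : (rest.takeWhile (fun x => x == c)).count k = 0 :=
          List.count_eq_zero.mpr (fun hx => hkc (htw k hx))
        conv_lhs => rw [← hsplit]
        rw [List.count_cons_of_ne (Ne.symm hkc), List.count_append, h1, Nat.zero_add]
      have hset : PySem.Set.ofList (c :: rest) =
          c :: PySem.Set.ofList (rest.dropWhile (fun x => x == c)) := by
        conv_lhs => rw [← hsplit]
        exact pv_ofList_run c _ _ htw hdw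
      have hlen : (rest.dropWhile (fun x => x == c)).length ≤ n := by
        have h1 := List.length_dropWhile_le (fun x => x == c) rest
        have h2 : rest.length + 1 ≤ n + 1 := by simpa using hl
        omega
      have hihdw := ih (rest.dropWhile (fun x => x == c)) hlen hpdw
      rw [countAltGo, hset, List.map_cons, List.sum_cons]
      have hmapeq : (PySem.Set.ofList (rest.dropWhile (fun x => x == c))).map
            (fun k => pvT (((c :: rest).count k : Nat) : Int)) =
          (PySem.Set.ofList (rest.dropWhile (fun x => x == c))).map
            (fun k => pvT (((rest.dropWhile (fun x => x == c)).count k : Nat) : Int)) := by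
        apply List.map_congr_left
        intro k hk
        rw [hcount_k k ((PySem.Set.mem_ofList _ k).mp hk)]
      rw [hmapeq, ← hihdw, hcount_c]
      have harith : (((rest.takeWhile (fun x => x == c)).length : Int) + 1) *
            ((((rest.takeWhile (fun x => x == c)).length : Int) + 1) + 1) =
          (((1 + (rest.takeWhile (fun x => x == c)).length : Nat) : Int) + 1) *
            ((1 + (rest.takeWhile (fun x => x == c)).length : Nat) : Int) := by
        push_cast; ring
      simp only [pvT, harith]

-- the sum over distinct characters is invariant under sorting
theorem pv_sum_sorted (l : List Char) :
    ((PySem.Set.ofList (PySem.List.sorted l (fun x => x) false)).map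
      (fun k => pvT (((PySem.List.sorted l (fun x => x) false).count k : Nat) : Int))).sum =
    ((PySem.Set.ofList l).map (fun k => pvT ((l.count k : Nat) : Int))).sum := by
  have hperm : (PySem.List.sorted l (fun x => x) false).Perm l :=
    PySem.List.sorted_perm l _ _
  have hcnt : ∀ k, (PySem.List.sorted l (fun x => x) false).count k = l.count k :=
    fun k => hperm.count_eq k
  have hsp : (PySem.Set.ofList (PySem.List.sorted l (fun x => x) false)).Perm
      (PySem.Set.ofList l) := by
    rw [List.perm_ext_iff_of_nodup (PySem.Set.nodup_ofList _) (PySem.Set.nodup_ofList _)]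
    intro a
    rw [PySem.Set.mem_ofList, PySem.Set.mem_ofList, hperm.mem_iff]
  calc ((PySem.Set.ofList (PySem.List.sorted l (fun x => x) false)).map
          (fun k => pvT (((PySem.List.sorted l (fun x => x) false).count k : Nat) : Int))).sum
      = ((PySem.Set.ofList (PySem.List.sorted l (fun x => x) false)).map
          (fun k => pvT ((l.count k : Nat) : Int))).sum := by
        congr 1; apply List.map_congr_left; intro k _; rw [hcnt]
    _ = ((PySem.Set.ofList l).map (fun k => pvT ((l.count k : Nat) : Int))).sum :=
        (hsp.map _).sum_eq

-- ===== VERDICT (by name: the statement is the Claim_ definition above) =====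
theorem count_spec : Claim_equal_count := by
  intro s _
  unfold Spec_count count_alt
  rw [pv_count_eq_sum]
  rw [pv_go_eq_sum (PySem.List.sorted s.toList (fun x => x) false).length _ le_rfl
      (by simpa using PySem.List.sorted_pairwise s.toList (fun x => x))]
  rw [pv_sum_sorted]
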